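-- pv_equiv track=rewrite | github.com/whbrewer/bptk_py | BPTK_Py/util/statecompression.py | _compress_time_series_data
-- ===== SOURCE A (Python) =====
-- def _compress_time_series_data(data):
--     """
--     Helper function to compress time-series data similar to compress_settings logic.
--     """
--     if not data:
--         return data
--
--     # Transform step-indexed data into compressed format
--     compressed = {}
--
--     for step in data.keys():
--         step_data = data[step]
--         if not isinstance(step_data, dict):
--             continue
--
--         for key, value in step_data.items():
--             if key not in compressed:
--                 compressed[key] = [value]
--             else:
--                 compressed[key].append(value)
--
--     return compressed
-- ===== SOURCE B (Python) =====
-- def _compress_time_series_data(data):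
--     """
--     Key-major re-implementation: collect the ordered unique keys first
--     (dict.fromkeys preserves first-encounter order), then build each key's
--     value list with one scan per key over the dict-valued steps.
--     """
--     if not data:
--         return data
--
--     keys = dict.fromkeys(
--         k
--         for step_data in data.values()
--         if isinstance(step_data, dict)
--         for k in step_data
--     )
--     return {
--         k: [sd[k] for sd in data.values() if isinstance(sd, dict) and k in sd]
--         for k in keys
--     }
-- ===== Notes on version B (the rewrite author's own statement) =====
-- stated objective: alternative
-- what changed: Inverts the step-major append loop with a growing dict into a key-major traversal: first dedup all keys in first-encounter order with dict.fromkeys, then a dict comprehension scans the steps once per key.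
import Mathlib
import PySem

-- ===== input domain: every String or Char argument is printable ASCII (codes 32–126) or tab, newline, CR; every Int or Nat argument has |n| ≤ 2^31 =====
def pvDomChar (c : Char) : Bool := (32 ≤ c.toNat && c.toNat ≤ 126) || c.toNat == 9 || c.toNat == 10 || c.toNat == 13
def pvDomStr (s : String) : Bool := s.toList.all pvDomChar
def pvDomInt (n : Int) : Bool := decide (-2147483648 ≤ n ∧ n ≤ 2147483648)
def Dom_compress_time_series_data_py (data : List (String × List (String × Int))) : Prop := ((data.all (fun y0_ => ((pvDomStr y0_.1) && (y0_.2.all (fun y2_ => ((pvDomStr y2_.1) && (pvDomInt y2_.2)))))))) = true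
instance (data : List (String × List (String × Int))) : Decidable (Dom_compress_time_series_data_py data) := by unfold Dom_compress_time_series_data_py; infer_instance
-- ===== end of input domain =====

-- B inverts A's step-major append loop into a key-major traversal (ordered key
-- dedup first, then one scan of the steps per key); objective: alternative
-- decomposition, same results.

-- ===== PORT A =====
-- Step-major transliteration of A: the `if not data` guard, then for each
-- step's dict (the isinstance check is always true under the type convention,
-- so the `continue` branch never fires and is not represented) fold its items
-- into a growing PySem.Dict — `[value]` for a fresh key, append otherwise —
-- and return that dict's items.
def compress_time_series_data_py (data : List (String × List (String × Int))) : List (String × List Int) :=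
  if data = [] then [] else
  (data.foldl
    (fun compressed step =>
      step.2.foldl
        (fun compressed kv =>
          if compressed.contains kv.1 = false then
            compressed.insert kv.1 [kv.2]
          else
            compressed.modify kv.1 [] (fun vs => vs ++ [kv.2]))
        compressed)
    (PySem.Dict.empty : PySem.Dict String (List Int))).items

-- ===== PORT B =====
-- Key-major transliteration of B: dict.fromkeys over all keys of the step
-- dicts (= PySem.List.dedup, first-encounter order), then for each key collect
-- step_data[key] (first-match dict lookup) from every step that contains it.
def compress_time_series_data_py_alt (data : List (String × List (String × Int))) : List (String × List Int) :=
  if data = [] then [] else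
  let keys := PySem.List.dedup (data.flatMap (fun step => step.2.map (fun kv => kv.1)))
  keys.map (fun k =>
    (k, data.flatMap (fun step =>
          match (PySem.Dict.mk step.2).get? k with
          | some v => [v]
          | none => [])))

-- ===== PRECONDITION & SPEC =====
-- Pre_ restricts the association lists to distinct outer and inner keys — the
-- only lists that represent Python dicts (A's input and its inner values are
-- dicts, which cannot carry duplicate keys); no real input is excluded.
def Pre_compress_time_series_data_py (data : List (String × List (String × Int))) : Prop :=
  (data.map Prod.fst).Nodup ∧ ∀ step ∈ data, (step.2.map Prod.fst).Nodup
instance (data : List (String × List (String × Int))) : Decidable (Pre_compress_time_series_data_py data) := by unfold Pre_compress_time_series_data_py; infer_instance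
def pvWitness_compress_time_series_data_py : (List (String × List (String × Int))) :=
  [("0", [("a", 1)]), ("1", [("a", 2), ("b", 3)])]
def Spec_compress_time_series_data_py (data : List (String × List (String × Int))) (out : List (String × List Int)) : Prop := out = compress_time_series_data_py_alt data
instance (data : List (String × List (String × Int))) (out : List (String × List Int)) : Decidable (Spec_compress_time_series_data_py data out) := by unfold Spec_compress_time_series_data_py; infer_instance

-- ===== CLAIM (what is proved, stated in full; the proofs are below) =====
def Claim_equal_compress_time_series_data_py : Prop := ∀ (data : List (String × List (String × Int))), Dom_compress_time_series_data_py data → Pre_compress_time_series_data_py data → Spec_compress_time_series_data_py data (compress_time_series_data_py data)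

-- ===== LEMMAS AND PROOFS =====

-- A's create-or-append branch is exactly `modify` with default [].
lemma pvStepA_eq_modify (c : PySem.Dict String (List Int)) (kv : String × Int) :
    (if c.contains kv.1 = false then c.insert kv.1 [kv.2]
     else c.modify kv.1 [] (fun vs => vs ++ [kv.2]))
      = c.modify kv.1 [] (fun vs => vs ++ [kv.2]) := by
  by_cases h : c.contains kv.1 = false
  · simp only [h, if_true]
    simp [PySem.Dict.modify, PySem.Dict.getD_of_not_contains c [] h]
  · simp [h]

-- the nested step-major fold is the fold over the flattened pair list
lemma pvFoldl_flatMap {α β γ : Type} (data : List (α × List β))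
    (g : γ → β → γ) (init : γ) :
    data.foldl (fun c s => s.2.foldl g c) init
      = (data.flatMap (fun s => s.2)).foldl g init := by
  induction data generalizing init with
  | nil => rfl
  | cons s rest ih => simp [List.flatMap_cons, List.foldl_append, ih]

-- B's per-step lookup equals filter-then-project when the step's keys are distinct
lemma pvLookup_eq_filter (l : List (String × Int)) (hnd : (l.map Prod.fst).Nodup)
    (k : String) :
    (match (PySem.Dict.mk l).get? k with
     | some v => [v]
     | none => ([] : List Int))
      = (l.filter (fun p => p.1 == k)).map (fun p => p.2) := by
  induction l with
  | nil => simp [PySem.Dict.get?]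
  | cons p t ih =>
    simp only [List.map_cons, List.nodup_cons] at hnd
    rw [PySem.Dict.get?_mk_cons]
    by_cases h : p.1 = k
    · subst h
      have : t.filter (fun q => q.1 == p.1) = [] := by
        apply List.filter_eq_nil_iff.mpr
        intro q hq hbe
        exact hnd.1 (List.mem_map.mpr ⟨q, hq, by simpa using hbe⟩)
      simp [this]
    · have hbe : (p.1 == k) = false := by simpa using h
      simp only [hbe, List.filter_cons]
      exact ih hnd.2

-- ===== VERDICT (by name: the statement is the Claim_ definition above) =====
theorem compress_time_series_data_py_spec : Claim_equal_compress_time_series_data_py := by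
  intro data _hDom hPre
  unfold Spec_compress_time_series_data_py
  unfold compress_time_series_data_py compress_time_series_data_py_alt
  by_cases hnil : data = []
  · simp [hnil]
  · simp only [hnil, if_false]
    have hfun : (fun (compressed : PySem.Dict String (List Int)) (kv : String × Int) =>
        if compressed.contains kv.1 = false then compressed.insert kv.1 [kv.2]
        else compressed.modify kv.1 [] (fun vs => vs ++ [kv.2]))
        = (fun compressed kv => compressed.modify kv.1 [] (fun vs => vs ++ [kv.2])) := by
      funext c kv; exact pvStepA_eq_modify c kv
    rw [hfun, pvFoldl_flatMap]
    set P := data.flatMap (fun s => s.2) with hP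
    have hkeys : (P.foldl (fun d p => d.modify p.1 [] (fun vs => vs ++ [p.2]))
        (PySem.Dict.empty : PySem.Dict String (List Int))).keys
        = PySem.Set.ofList (P.map Prod.fst) := by
      rw [PySem.Dict.keys_foldl_modify_key P Prod.fst [] (fun _ x => fun vs => vs ++ [x.2])]
      simp [PySem.Set.update_nil_left]
    have hnd : (P.foldl (fun d p => d.modify p.1 [] (fun vs => vs ++ [p.2]))
        (PySem.Dict.empty : PySem.Dict String (List Int))).keys.Nodup := by
      apply PySem.Dict.nodup_keys_foldl_modify_key
      simp
    rw [PySem.Dict.items_eq_map_keys _ hnd []]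
    rw [hkeys]
    have hkeysB : PySem.List.dedup (data.flatMap (fun step => step.2.map (fun kv => kv.1)))
        = PySem.Set.ofList (P.map Prod.fst) := by
      rw [PySem.List.dedup_eq_ofList, hP, List.map_flatMap]
    rw [hkeysB]
    apply List.map_congr_left
    intro k _hk
    refine Prod.ext rfl ?_
    simp only
    rw [PySem.Dict.getD_foldl_modify_append]
    have : (data.flatMap (fun step =>
          match (PySem.Dict.mk step.2).get? k with
          | some v => [v]
          | none => ([] : List Int)))
        = data.flatMap (fun step => (step.2.filter (fun p => p.1 == k)).map (fun p => p.2)) := by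
      apply List.flatMap_congr  -- congruence over steps, using each step's Nodup keys
      intro step hstep
      exact pvLookup_eq_filter step.2 (hPre.2 step hstep) k
    rw [this, hP, List.filter_flatMap, List.map_flatMap]
    simp
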